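-- pv_equiv track=rewrite | github.com/Hermi-git/Comptitive_programming | 06-Feb-2025/Apply Operations to an Array 246721.py | applyOperations
-- ===== SOURCE A (Python) =====
-- from typing import List
--
-- def applyOperations(nums: List[int]) -> List[int]:
--     for i in range(len(nums)-1):
--         if nums[i] == nums[i+1]:
--             nums[i] = 2 * nums[i]
--             nums[i+1] = 0
--     l = 0
--     for r in range(len(nums)):
--         if nums[r] != 0:
--             nums[l] = nums[r]
--             l += 1
--     while l < len(nums):
--         nums[l] = 0
--         l += 1
--     return nums
-- ===== SOURCE B (Python) =====
-- from typing import List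
--
-- def applyOperations(nums: List[int]) -> List[int]:
--     for i in range(len(nums) - 1):
--         if nums[i] == nums[i + 1]:
--             nums[i] = 2 * nums[i]
--             nums[i + 1] = 0
--     # stable sort: zeros (key True) go last, non-zero order preserved
--     nums.sort(key=lambda x: x == 0)
--     return nums
-- ===== Notes on version B (the rewrite author's own statement) =====
-- stated objective: idiomatic
-- what changed: The hand-written two-pointer compaction plus zero-fill while-loop is replaced by a single stable in-place sort keyed on 'x == 0', which moves all zeros to the end while preserving non-zero order.
import Mathlib
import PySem

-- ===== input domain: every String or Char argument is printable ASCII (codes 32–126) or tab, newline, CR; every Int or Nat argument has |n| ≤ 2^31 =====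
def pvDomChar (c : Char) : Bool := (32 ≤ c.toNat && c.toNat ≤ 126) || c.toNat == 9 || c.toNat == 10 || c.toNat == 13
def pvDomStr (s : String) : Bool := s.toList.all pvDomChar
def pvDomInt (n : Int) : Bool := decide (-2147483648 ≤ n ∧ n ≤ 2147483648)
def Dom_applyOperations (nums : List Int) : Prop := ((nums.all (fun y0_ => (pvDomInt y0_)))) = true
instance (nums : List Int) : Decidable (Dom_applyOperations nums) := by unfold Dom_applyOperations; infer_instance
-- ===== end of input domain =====

-- B replaces A's two-pointer compaction + zero-fill by one stable in-place sort keyed on (x == 0);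
-- equivalence is about the returned value (both Pythons mutate and return the same nums object).

-- ===== PORT A =====
-- shared first loop of both Pythons (identical source text in A and B):
-- for i in range(len(nums)-1): if nums[i] == nums[i+1]: nums[i] = 2*nums[i]; nums[i+1] = 0
def pvDouble (a : List Int) (i : Nat) : List Int :=
  if a.getD i 0 = a.getD (i + 1) 0 then (a.set i (2 * a.getD i 0)).set (i + 1) 0 else a

-- one step of A's compaction loop: state (nums, l), index r
def pvCompactStep (st : List Int × Nat) (r : Nat) : List Int × Nat :=
  if st.1.getD r 0 ≠ 0 then (st.1.set st.2 (st.1.getD r 0), st.2 + 1) else st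

def applyOperations (nums : List Int) : List Int :=
  let a := (List.range (nums.length - 1)).foldl pvDouble nums
  let st := (List.range a.length).foldl pvCompactStep (a, 0)
  -- while l < len(nums): nums[l] = 0; l += 1
  (List.range' st.2 (st.1.length - st.2)).foldl (fun b j => b.set j 0) st.1

-- ===== PORT B =====
def applyOperations_alt (nums : List Int) : List Int :=
  let a := (List.range (nums.length - 1)).foldl pvDouble nums
  PySem.List.sorted a (fun x => x == 0) false

-- ===== PRECONDITION & SPEC =====
def Spec_applyOperations (nums : List Int) (out : List Int) : Prop := out = applyOperations_alt nums
instance (nums : List Int) (out : List Int) : Decidable (Spec_applyOperations nums out) := by unfold Spec_applyOperations; infer_instance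

-- ===== CLAIM (what is proved, stated in full; the proofs are below) =====
def Claim_equal_applyOperations : Prop := ∀ (nums : List Int), Dom_applyOperations nums → Spec_applyOperations nums (applyOperations nums)



-- ===== LEMMAS AND PROOFS =====

-- (b.set l x).take (l+1) = b.take l ++ [x]
theorem pv_take_set_succ (b : List Int) (l : Nat) (x : Int) (h : l < b.length) :
    (b.set l x).take (l + 1) = b.take l ++ [x] := by
  rw [List.set_eq_take_append_cons_drop, if_pos h]
  rw [show l + 1 = (b.take l).length + 1 by simp [List.length_take]; omega]
  rw [List.take_append]
  simp

-- the zero-fill while-loop overwrites everything from index l on with 0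
theorem pv_fill_aux : ∀ (k : Nat) (b : List Int) (l : Nat), l + k = b.length →
    (List.range' l k).foldl (fun c j => c.set j 0) b = b.take l ++ List.replicate k 0 := by
  intro k
  induction k with
  | zero =>
    intro b l h
    simp only [List.range'_zero, List.foldl_nil, List.replicate_zero, List.append_nil]
    rw [List.take_of_length_le (by omega)]
  | succ k ih =>
    intro b l h
    rw [List.range'_succ, List.foldl_cons]
    rw [ih (b.set l 0) (l + 1) (by simp; omega)]
    rw [pv_take_set_succ b l 0 (by omega)]
    simp [List.replicate_succ]

theorem pv_fill_spec (b : List Int) (l : Nat) (h : l ≤ b.length) :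
    (List.range' l (b.length - l)).foldl (fun c j => c.set j 0) b
      = b.take l ++ List.replicate (b.length - l) 0 := by
  exact pv_fill_aux (b.length - l) b l (by omega)

-- invariant of A's compaction loop
theorem pv_compact_inv (a0 : List Int) :
    ∀ (k r : Nat) (b : List Int) (l : Nat),
      b.length = a0.length → l ≤ r → r + k = a0.length →
      b.take l = (a0.take r).filter (fun x => x ≠ 0) →
      l = ((a0.take r).filter (fun x => x ≠ 0)).length →
      b.drop r = a0.drop r →
      ((List.range' r k).foldl pvCompactStep (b, l)).1.length = a0.length ∧
      ((List.range' r k).foldl pvCompactStep (b, l)).1.take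
          ((List.range' r k).foldl pvCompactStep (b, l)).2 = a0.filter (fun x => x ≠ 0) ∧
      ((List.range' r k).foldl pvCompactStep (b, l)).2 = (a0.filter (fun x => x ≠ 0)).length := by
  intro k
  induction k with
  | zero =>
    intro r b l hlen hlr hrk htake hl hdrop
    have hr : r = a0.length := by omega
    subst hr
    simp only [List.range'_zero, List.foldl_nil]
    rw [List.take_of_length_le (le_refl _)] at htake hl
    exact ⟨hlen, htake, hl⟩
  | succ k ih =>
    intro r b l hlen hlr hrk htake hl hdrop
    have hrlt : r < a0.length := by omega
    have hbr : b[r]? = a0[r]? := by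
      have h1 : (b.drop r)[0]? = (a0.drop r)[0]? := by rw [hdrop]
      simpa [List.getElem?_drop] using h1
    have ha0r : a0[r]? = some (a0.getD r 0) := by
      simp [List.getD_eq_getElem?_getD, List.getElem?_eq_getElem hrlt]
    have htakesucc : a0.take (r + 1) = a0.take r ++ [a0.getD r 0] := by
      rw [List.take_succ, ha0r]; rfl
    have hdropsucc : b.drop (r + 1) = a0.drop (r + 1) := by
      have h1 : b.drop (r + 1) = (b.drop r).drop 1 := by rw [List.drop_drop]
      rw [h1, hdrop, List.drop_drop]
    rw [List.range'_succ, List.foldl_cons]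
    by_cases hx : a0.getD r 0 = 0
    · have hx' : a0[r]?.getD 0 = 0 := by rw [← List.getD_eq_getElem?_getD]; exact hx
      have hstep : pvCompactStep (b, l) r = (b, l) := by
        simp [pvCompactStep, hbr, hx']
      rw [hstep]
      refine ih (r + 1) b l hlen (by omega) (by omega) ?_ ?_ hdropsucc
      · rw [htakesucc]; simp [List.filter_append, hx', htake]
      · rw [htakesucc]; simp [List.filter_append, hx', hl]
    · have hx' : ¬ a0[r]?.getD 0 = 0 := by rw [← List.getD_eq_getElem?_getD]; exact hx
      have hstep : pvCompactStep (b, l) r = (b.set l (a0.getD r 0), l + 1) := by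
        simp [pvCompactStep, hbr, hx', List.getD_eq_getElem?_getD]
      rw [hstep]
      have hllt : l < b.length := by omega
      refine ih (r + 1) (b.set l (a0.getD r 0)) (l + 1) (by simp [hlen]) (by omega) (by omega)
        ?_ ?_ ?_
      · rw [pv_take_set_succ b l _ hllt, htakesucc]
        simp [List.filter_append, hx', htake, List.getD_eq_getElem?_getD]
      · rw [htakesucc]; simp [List.filter_append, hx', hl]
      · rw [List.drop_set, if_pos (by omega : l < r + 1)]
        exact hdropsucc

-- the insertion comparator of B's sort (key x = (x == 0) : Bool, False < True)
theorem pv_insert_zero (x : Int) (C : List Int) (hx : x = 0) :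
    PySem.List.insertBy (fun a b => decide ((a == 0) < (b == 0))) x C = C ++ [x] := by
  apply PySem.List.insertBy_of_forall_not_before
  intro y _
  subst hx
  simp only [beq_self_eq_true]
  cases h : (y == 0) <;> simp [h, Bool.lt_iff]

theorem pv_insert_nonzero : ∀ (A : List Int) (B : List Int) (x : Int), x ≠ 0 →
    (∀ y ∈ A, y ≠ 0) → (∀ y ∈ B, y = 0) →
    PySem.List.insertBy (fun a b => decide ((a == 0) < (b == 0))) x (A ++ B) = A ++ x :: B := by
  intro A
  induction A with
  | nil =>
    intro B x hx _ hB
    have hx0 : (x == 0) = false := by simp [hx]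
    cases B with
    | nil => simp [PySem.List.insertBy]
    | cons y ys =>
      have hy : y = 0 := hB y (by simp)
      simp [PySem.List.insertBy, hx0, hy, Bool.lt_iff]
      intro h
      exact absurd h hx
  | cons a A ih =>
    intro B x hx hA hB
    have ha : a ≠ 0 := hA a (by simp)
    have ha0 : (a == 0) = false := by simp [ha]
    simp only [List.cons_append, PySem.List.insertBy]
    rw [if_neg (by simp [ha0, Bool.lt_iff])]
    rw [ih B x hx (fun y hy => hA y (by simp [hy])) hB]

theorem pv_sort_fold : ∀ (xs A B : List Int), (∀ y ∈ A, y ≠ 0) → (∀ y ∈ B, y = 0) →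
    xs.foldl (fun acc x => PySem.List.insertBy (fun a b => decide ((a == 0) < (b == 0))) x acc) (A ++ B)
      = (A ++ xs.filter (fun x => !(x == 0))) ++ (B ++ xs.filter (fun x => x == 0)) := by
  intro xs
  induction xs with
  | nil => intro A B _ _; simp
  | cons x xs ih =>
    intro A B hA hB
    rw [List.foldl_cons]
    by_cases hx : x = 0
    · rw [pv_insert_zero x (A ++ B) hx, List.append_assoc]
      rw [ih A (B ++ [x]) hA (by intro y hy; rcases List.mem_append.mp hy with h | h
                                 · exact hB y h
                                 · simp at h; omega)]
      simp [hx, List.append_assoc]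
    · rw [pv_insert_nonzero A B x hx hA hB]
      rw [show A ++ x :: B = (A ++ [x]) ++ B by simp]
      rw [ih (A ++ [x]) B (by intro y hy; rcases List.mem_append.mp hy with h | h
                              · exact hA y h
                              · simp at h; omega) hB]
      simp [hx, List.append_assoc]

-- B's stable sort on the Boolean key (x == 0) is: non-zeros (in order), then zeros
theorem pv_sorted_spec (a : List Int) :
    PySem.List.sorted a (fun x => x == 0) false
      = a.filter (fun x => !(x == 0)) ++ a.filter (fun x => x == 0) := by
  rw [PySem.List.sorted_eq_foldl_insertBy]
  have := pv_sort_fold a [] [] (by simp) (by simp)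
  simpa using this

-- the zero suffix of A's result equals the filtered zeros of B's sort
theorem pv_zeros_eq (a : List Int) :
    List.replicate (a.length - (a.filter (fun x => x ≠ 0)).length) (0 : Int)
      = a.filter (fun x => x == 0) := by
  have hall : ∀ y ∈ a.filter (fun x => x == 0), y = (0 : Int) := by
    intro y hy
    have := List.of_mem_filter hy
    simpa using this
  have hrep := List.eq_replicate_of_mem hall
  have hlen : (a.filter (fun x => x ≠ 0)).length + (a.filter (fun x => x == 0)).length = a.length := by
    have h := (List.length_eq_length_filter_add (l := a) (fun x => decide (x ≠ 0))).symm
    have hc : a.filter (fun x => !(decide (x ≠ 0))) = a.filter (fun x => x == 0) := by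
      apply List.filter_congr
      intro y _
      by_cases hy : y = 0 <;> simp [hy]
    rw [hc] at h
    exact h
  rw [show a.length - (a.filter (fun x => x ≠ 0)).length = (a.filter (fun x => x == 0)).length
        from by omega]
  exact hrep.symm

theorem pv_filter_ne (a : List Int) :
    a.filter (fun x => x ≠ 0) = a.filter (fun x => !(x == 0)) := by
  apply List.filter_congr
  intro y _
  by_cases hy : y = 0 <;> simp [hy]

-- A's compaction + zero-fill equals B's stable sort, for any intermediate list a
theorem pv_main (a : List Int) :
    (List.range' ((List.range a.length).foldl pvCompactStep (a, 0)).2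
        (((List.range a.length).foldl pvCompactStep (a, 0)).1.length
          - ((List.range a.length).foldl pvCompactStep (a, 0)).2)).foldl
        (fun b j => b.set j 0) ((List.range a.length).foldl pvCompactStep (a, 0)).1
      = PySem.List.sorted a (fun x => x == 0) false := by
  have hinv := pv_compact_inv a a.length 0 a 0 rfl (le_refl 0) (by omega) (by simp) (by simp) rfl
  rw [← List.range_eq_range'] at hinv
  obtain ⟨hlen, htake, hl⟩ := hinv
  set st := (List.range a.length).foldl pvCompactStep (a, 0) with hst
  have hle : st.2 ≤ st.1.length := by
    rw [hl, hlen]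
    exact List.length_filter_le _ _
  rw [pv_fill_spec st.1 st.2 hle]
  rw [htake, hlen, hl]
  rw [pv_sorted_spec, pv_zeros_eq, pv_filter_ne]

-- ===== VERDICT (by name: the statement is the Claim_ definition above) =====
theorem applyOperations_spec : Claim_equal_applyOperations := by
  intro nums _
  unfold Spec_applyOperations applyOperations applyOperations_alt
  exact pv_main ((List.range (nums.length - 1)).foldl pvDouble nums)
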